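-- pv_equiv track=rewrite | github.com/valentmamesah/calorie-counter | food_calorie_estimator/calorie_estimator.py | hitung_total_kalori
-- ===== SOURCE A (Python) =====
-- def hitung_total_kalori(detected_items, kalori_dict):
--     rincian = {}
--     total_kalori = 0
--
--     for item in detected_items:
--         class_name = item.get("class")
--         kalori = kalori_dict.get(class_name, 0)
--         rincian[class_name] = rincian.get(class_name, 0) + kalori
--         total_kalori += kalori
--
--     return total_kalori, rincian
-- ===== SOURCE B (Python) =====
-- def hitung_total_kalori(detected_items, kalori_dict):
--     # Different decomposition: group per-item calories by class in one pass,
--     # then sum each group; total is computed separately over items in order.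
--     groups = {}
--     for item in detected_items:
--         c = item.get("class")
--         groups.setdefault(c, []).append(kalori_dict.get(c, 0))
--     rincian = {c: sum(vals) for c, vals in groups.items()}
--     total_kalori = sum(kalori_dict.get(item.get("class"), 0) for item in detected_items)
--     return total_kalori, rincian
-- ===== Notes on version B (the rewrite author's own statement) =====
-- stated objective: alternative
-- what changed: B replaces A's single fold that updates a running per-class sum dict with a group-then-sum decomposition: one pass builds per-class lists of calorie values via setdefault, a second pass sums each group, and the total is a separate sum over the items in order.
-- outside the precondition, e.g. on hitung_total_kalori([{}], {}): A returns (0, {None: 0}), B returns (0, {None: 0})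
import Mathlib
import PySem

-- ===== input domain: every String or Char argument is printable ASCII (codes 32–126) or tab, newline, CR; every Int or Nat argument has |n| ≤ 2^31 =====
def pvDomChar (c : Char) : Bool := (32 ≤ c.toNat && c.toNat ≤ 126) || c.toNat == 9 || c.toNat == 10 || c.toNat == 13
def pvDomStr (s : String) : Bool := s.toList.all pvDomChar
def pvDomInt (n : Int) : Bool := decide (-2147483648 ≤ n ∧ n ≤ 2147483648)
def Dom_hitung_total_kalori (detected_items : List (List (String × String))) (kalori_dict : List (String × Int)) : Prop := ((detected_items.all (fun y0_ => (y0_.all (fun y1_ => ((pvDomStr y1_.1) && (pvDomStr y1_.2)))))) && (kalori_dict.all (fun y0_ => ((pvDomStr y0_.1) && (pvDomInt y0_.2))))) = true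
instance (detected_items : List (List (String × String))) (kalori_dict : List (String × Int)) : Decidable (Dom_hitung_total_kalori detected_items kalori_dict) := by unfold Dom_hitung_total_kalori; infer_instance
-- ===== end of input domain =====

-- B changes the decomposition (group per-class values, then sum each group, total summed
-- separately over items in order); same cost, no speed claim.

-- ===== PORT A =====
def hitung_total_kalori (detected_items : List (List (String × String))) (kalori_dict : List (String × Int)) : Int × (List (String × Int)) :=
  let r := detected_items.foldl
    (fun (st : PySem.Dict String Int × Int) item =>
      let class_name := PySem.Dict.getD (PySem.Dict.mk item) "class" ""
      let kalori := PySem.Dict.getD (PySem.Dict.mk kalori_dict) class_name 0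
      (PySem.Dict.insert st.1 class_name (PySem.Dict.getD st.1 class_name 0 + kalori), st.2 + kalori))
    (PySem.Dict.empty, 0)
  (r.2, r.1.items)

-- ===== PORT B =====
def hitung_total_kalori_alt (detected_items : List (List (String × String))) (kalori_dict : List (String × Int)) : Int × (List (String × Int)) :=
  let groups : PySem.Dict String (List Int) := detected_items.foldl
    (fun g item =>
      let c := PySem.Dict.getD (PySem.Dict.mk item) "class" ""
      -- groups.setdefault(c, []).append(kalori_dict.get(c, 0))
      PySem.Dict.modify g c [] (fun vs => vs ++ [PySem.Dict.getD (PySem.Dict.mk kalori_dict) c 0]))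
    PySem.Dict.empty
  let rincian := groups.items.map (fun p => (p.1, p.2.sum))
  let total_kalori := detected_items.foldl
    (fun t item => t + PySem.Dict.getD (PySem.Dict.mk kalori_dict) (PySem.Dict.getD (PySem.Dict.mk item) "class" "") 0) 0
  (total_kalori, rincian)

-- ===== PRECONDITION & SPEC =====
-- Pre_ excludes inputs with an item lacking the key "class": there Python A still returns,
-- but its result dict has the non-string key None, which is not a value of the declared
-- return type dict[str, int] (unrepresentable as List (String × Int)).
def Pre_hitung_total_kalori (detected_items : List (List (String × String))) (kalori_dict : List (String × Int)) : Prop :=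
  ∀ item ∈ detected_items, "class" ∈ item.map Prod.fst
instance (detected_items : List (List (String × String))) (kalori_dict : List (String × Int)) : Decidable (Pre_hitung_total_kalori detected_items kalori_dict) := by unfold Pre_hitung_total_kalori; infer_instance
def pvWitness_hitung_total_kalori : (List (List (String × String))) × (List (String × Int)) :=
  ([[("class", "apel")], [("class", "nasi")], [("class", "apel")]], [("apel", 52), ("nasi", 180)])

def Spec_hitung_total_kalori (detected_items : List (List (String × String))) (kalori_dict : List (String × Int)) (out : Int × (List (String × Int))) : Prop := out = hitung_total_kalori_alt detected_items kalori_dict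
instance (detected_items : List (List (String × String))) (kalori_dict : List (String × Int)) (out : Int × (List (String × Int))) : Decidable (Spec_hitung_total_kalori detected_items kalori_dict out) := by unfold Spec_hitung_total_kalori; infer_instance

-- ===== CLAIM (what is proved, stated in full; the proofs are below) =====
def Claim_equal_hitung_total_kalori : Prop := ∀ (detected_items : List (List (String × String))) (kalori_dict : List (String × Int)), Dom_hitung_total_kalori detected_items kalori_dict → Pre_hitung_total_kalori detected_items kalori_dict → Spec_hitung_total_kalori detected_items kalori_dict (hitung_total_kalori detected_items kalori_dict)

-- ===== LEMMAS AND PROOFS =====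

/-- A's fold over a pair of accumulators splits into two independent folds. -/
theorem pvFoldPairSplit {α : Type} (key : α → String) (w : α → Int) :
    ∀ (l : List α) (d : PySem.Dict String Int) (t : Int),
      l.foldl (fun (st : PySem.Dict String Int × Int) x =>
          (PySem.Dict.insert st.1 (key x) (PySem.Dict.getD st.1 (key x) 0 + w x), st.2 + w x)) (d, t)
      = (l.foldl (fun d x => PySem.Dict.insert d (key x) (PySem.Dict.getD d (key x) 0 + w x)) d,
         l.foldl (fun t x => t + w x) t) := by
  intro l
  induction l with
  | nil => intro d t; rfl
  | cons x xs ih => intro d t; simp [List.foldl_cons, ih]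

/-- Value of A's insert-accumulate fold at a key. -/
theorem pvGetDInsertAdd {α : Type} (key : α → String) (w : α → Int) :
    ∀ (l : List α) (d : PySem.Dict String Int) (c : String),
      PySem.Dict.getD (l.foldl (fun d x => PySem.Dict.insert d (key x) (PySem.Dict.getD d (key x) 0 + w x)) d) c 0
      = PySem.Dict.getD d c 0 + ((l.filter (fun x => key x == c)).map w).sum := by
  intro l
  induction l with
  | nil => intro d c; simp
  | cons x xs ih =>
    intro d c
    simp only [List.foldl_cons, ih, List.filter_cons]
    by_cases h : key x = c
    · simp [h]
      ring
    · simp [PySem.Dict.getD_insert, h]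
      exact fun hc => absurd hc.symm h

/-- Value of B's grouping fold at a key. -/
theorem pvGetDGroup {α : Type} (key : α → String) (w : α → Int) :
    ∀ (l : List α) (d : PySem.Dict String (List Int)) (c : String),
      PySem.Dict.getD (l.foldl (fun g x => PySem.Dict.modify g (key x) [] (fun vs => vs ++ [w x])) d) c []
      = PySem.Dict.getD d c [] ++ ((l.filter (fun x => key x == c)).map w) := by
  intro l
  induction l with
  | nil => intro d c; simp
  | cons x xs ih =>
    intro d c
    simp only [List.foldl_cons, ih, List.filter_cons]
    by_cases h : key x = c
    · simp [h]
    · simp [PySem.Dict.getD_modify, h]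
      exact fun hc => absurd hc.symm h

/-- The items of A's per-class sum dict are B's groups with each group summed. -/
theorem pvItemsEq {α : Type} (key : α → String) (w : α → Int) (l : List α) :
    (l.foldl (fun d x => PySem.Dict.insert d (key x) (PySem.Dict.getD d (key x) 0 + w x)) PySem.Dict.empty).items
    = ((l.foldl (fun g x => PySem.Dict.modify g (key x) [] (fun vs => vs ++ [w x])) PySem.Dict.empty).items).map
        (fun p => (p.1, p.2.sum)) := by
  have hndA : (l.foldl (fun d x => PySem.Dict.insert d (key x) (PySem.Dict.getD d (key x) 0 + w x)) PySem.Dict.empty).keys.Nodup :=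
    PySem.Dict.nodup_keys_foldl_insert_key l key _ _ (by simp)
  have hndB : (l.foldl (fun g x => PySem.Dict.modify g (key x) [] (fun vs => vs ++ [w x])) PySem.Dict.empty).keys.Nodup :=
    PySem.Dict.nodup_keys_foldl_modify_key l key [] _ _ (by simp)
  have hkeys : (l.foldl (fun d x => PySem.Dict.insert d (key x) (PySem.Dict.getD d (key x) 0 + w x)) PySem.Dict.empty).keys
      = (l.foldl (fun g x => PySem.Dict.modify g (key x) [] (fun vs => vs ++ [w x])) PySem.Dict.empty).keys := by
    rw [PySem.Dict.keys_foldl_insert_key, PySem.Dict.keys_foldl_modify_key]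
    rfl
  rw [PySem.Dict.items_eq_map_keys _ hndA 0, PySem.Dict.items_eq_map_keys _ hndB ([] : List Int),
      hkeys, List.map_map]
  refine List.map_congr_left (fun c _ => ?_)
  simp only [Function.comp]
  rw [pvGetDInsertAdd key w, pvGetDGroup key w]
  simp

-- ===== VERDICT (by name: the statement is the Claim_ definition above) =====
theorem hitung_total_kalori_spec : Claim_equal_hitung_total_kalori := by
  intro di kd _ _
  unfold Spec_hitung_total_kalori hitung_total_kalori hitung_total_kalori_alt
  simp only []
  rw [pvFoldPairSplit (fun item => PySem.Dict.getD (PySem.Dict.mk item) "class" "")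
        (fun item => PySem.Dict.getD (PySem.Dict.mk kd) (PySem.Dict.getD (PySem.Dict.mk item) "class" "") 0)]
  refine Prod.ext rfl ?_
  exact pvItemsEq _ _ di
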